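-- pv_equiv track=rewrite | github.com/Soong22/exam_parser_sn | exam_parser-main/01_middle_process/05_merge_pdf _v1.py | _count_edge_nonln
-- ===== SOURCE A (Python) =====
-- import json, re, unicodedata
--
-- def _count_edge_nonln(s: str):
--     lead = 0
--     for ch in s or "":
--         if unicodedata.category(ch)[0] not in ("L", "N"): lead += 1
--         else: break
--     trail = 0
--     for ch in reversed(s or ""):
--         if unicodedata.category(ch)[0] not in ("L", "N"): trail += 1
--         else: break
--     return lead, trail
-- ===== SOURCE B (Python) =====
-- import unicodedata
--
-- def _count_edge_nonln(s: str):
--     mask = "".join("1" if unicodedata.category(ch)[0] in ("L", "N") else "0"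
--                    for ch in (s or ""))
--     lead = len(mask) - len(mask.lstrip("0"))
--     trail = len(mask) - len(mask.rstrip("0"))
--     return lead, trail
-- ===== Notes on version B (the rewrite author's own statement) =====
-- stated objective: alternative
-- what changed: Replaces A's two early-exit edge loops with one full pass that materialises a boolean mask string and derives both counts as length differences after stripping the false marks from each end.
import Mathlib
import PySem

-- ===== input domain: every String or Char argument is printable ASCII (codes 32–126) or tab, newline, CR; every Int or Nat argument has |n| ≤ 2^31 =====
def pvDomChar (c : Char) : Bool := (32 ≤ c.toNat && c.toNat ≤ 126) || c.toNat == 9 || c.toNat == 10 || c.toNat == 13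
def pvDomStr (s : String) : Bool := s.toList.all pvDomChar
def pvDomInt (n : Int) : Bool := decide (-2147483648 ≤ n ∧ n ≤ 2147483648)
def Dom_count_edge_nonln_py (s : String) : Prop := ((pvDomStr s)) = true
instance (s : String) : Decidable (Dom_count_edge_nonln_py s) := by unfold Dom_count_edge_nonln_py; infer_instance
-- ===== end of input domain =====

-- ===== PORT A =====
-- A, transliterated: two early-exit loops, one over the chars, one over the reversed chars.
-- 'unicodedata.category(ch)[0] in ("L","N")' is exact on the ASCII domain as isLN (letter or digit).
def pvIsLN (c : Char) : Bool := c.isAlpha || c.isDigit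

def pvCountEdge : List Char → Int
  | [] => 0
  | c :: t => if ¬ (pvIsLN c) then 1 + pvCountEdge t else 0

def count_edge_nonln_py (s : String) : Int × Int :=
  (pvCountEdge s.toList, pvCountEdge s.toList.reverse)

-- ===== PORT B =====
-- B: build the 0/1 mask over the whole string, then lead/trail = length minus length after
-- stripping leading/trailing '0's (lstrip '0' = dropWhile; rstrip '0' = reverse∘dropWhile∘reverse).
def pvMask (l : List Char) : List Char := l.map (fun c => if pvIsLN c then '1' else '0')

def count_edge_nonln_py_alt (s : String) : Int × Int :=
  let mask := pvMask s.toList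
  let lead : Int := (mask.length : Int) - ((mask.dropWhile (· == '0')).length : Int)
  let trail : Int := (mask.length : Int) - (((mask.reverse.dropWhile (· == '0')).reverse).length : Int)
  (lead, trail)

-- ===== PRECONDITION & SPEC =====
def Spec_count_edge_nonln_py (s : String) (out : Int × Int) : Prop := out = count_edge_nonln_py_alt s
instance (s : String) (out : Int × Int) : Decidable (Spec_count_edge_nonln_py s out) := by unfold Spec_count_edge_nonln_py; infer_instance

-- ===== CLAIM (what is proved, stated in full; the proofs are below) =====
def Claim_equal_count_edge_nonln_py : Prop := ∀ (s : String), Dom_count_edge_nonln_py s → Spec_count_edge_nonln_py s (count_edge_nonln_py s)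

-- ===== LEMMAS AND PROOFS =====
theorem pvCountEdge_eq_mask (l : List Char) :
    pvCountEdge l = ((pvMask l).length : Int) - (((pvMask l).dropWhile (· == '0')).length : Int) := by
  induction l with
  | nil => simp [pvCountEdge, pvMask]
  | cons c t ih =>
    by_cases h : pvIsLN c
    · simp [pvCountEdge, pvMask, h]
    · simp [pvCountEdge, pvMask, h, ih]
      omega

-- ===== VERDICT (by name: the statement is the Claim_ definition above) =====
theorem count_edge_nonln_py_spec : Claim_equal_count_edge_nonln_py := by
  intro s _
  show _ = _
  simp only [count_edge_nonln_py, count_edge_nonln_py_alt]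
  have h1 := pvCountEdge_eq_mask s.toList
  have h2 := pvCountEdge_eq_mask s.toList.reverse
  have hm : pvMask s.toList.reverse = (pvMask s.toList).reverse := by
    simp [pvMask, List.map_reverse]
  rw [hm] at h2
  refine Prod.ext ?_ ?_
  · simpa using h1
  · simp only [List.length_reverse] at h2 ⊢
    simpa using h2
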